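-- pv_equiv track=rewrite | github.com/amarhod/skyscanner-cheapest-day | analyzer.py | cheapest_day_route
-- ===== SOURCE A (Python) =====
-- def cheapest_day_route(route_prices):
--     if(len(route_prices) == 0):
--             return None
--     cheapest_day = route_prices[0]
--     unique_route_count = 0
--     for day_price in route_prices:
--         unique_route_count += day_price[2]
--         if(day_price[1] < cheapest_day[1]):
--             cheapest_day = day_price
--     cheapest_day = (cheapest_day[0], cheapest_day[1], unique_route_count)
--     return cheapest_day
-- ===== SOURCE B (Python) =====
-- def cheapest_day_route(route_prices):
--     if not route_prices:
--         return None
--     total = sum(x[2] for x in route_prices)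
--     day, price, _ = sorted(route_prices, key=lambda x: x[1])[0]
--     return (day, price, total)
-- ===== Notes on version B (the rewrite author's own statement) =====
-- stated objective: alternative
-- what changed: Replaced A's fused strict-< scanning loop by sort-then-take-head: B stably sorts the list by price and takes the first element (stability makes it the first minimal, matching A's strict <), with the route count obtained by a separate sum.
import Mathlib
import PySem

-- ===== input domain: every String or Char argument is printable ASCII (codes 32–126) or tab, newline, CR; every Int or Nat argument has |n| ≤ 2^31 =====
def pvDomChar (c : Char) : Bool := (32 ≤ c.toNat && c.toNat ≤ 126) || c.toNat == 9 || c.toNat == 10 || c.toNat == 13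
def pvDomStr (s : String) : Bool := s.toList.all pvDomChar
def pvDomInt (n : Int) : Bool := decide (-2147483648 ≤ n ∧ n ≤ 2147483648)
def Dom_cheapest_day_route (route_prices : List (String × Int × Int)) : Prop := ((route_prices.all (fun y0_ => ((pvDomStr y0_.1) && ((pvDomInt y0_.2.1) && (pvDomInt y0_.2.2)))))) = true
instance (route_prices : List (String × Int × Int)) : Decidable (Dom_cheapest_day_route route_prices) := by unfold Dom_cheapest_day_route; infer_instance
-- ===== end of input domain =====

-- B replaces A's fused strict-< scanning loop by sort-then-take-head (stable sort by price, first element = first minimal) plus a separate sum; alternative decomposition, not faster.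


-- ===== PORT A =====
-- A: one fold over the list, carrying (cheapest-so-far, running count)
def cheapest_day_route (route_prices : List (String × Int × Int)) : Option (String × Int × Int) :=
  match route_prices with
  | [] => none
  | c0 :: _ =>
    let st := route_prices.foldl
      (fun (st : (String × Int × Int) × Int) day_price =>
        let st := (st.1, st.2 + day_price.2.2)
        if day_price.2.1 < st.1.2.1 then (day_price, st.2) else st)
      (c0, 0)
    some (st.1.1, st.1.2.1, st.2)

-- ===== PORT B =====
-- B: sum the counts, then stably sort by price and take the first element
def cheapest_day_route_alt (route_prices : List (String × Int × Int)) : Option (String × Int × Int) :=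
  match route_prices with
  | [] => none
  | _ =>
    let total := (route_prices.map (fun x => x.2.2)).sum
    match PySem.List.sorted route_prices (fun x => x.2.1) with
    | [] => none
    | m :: _ => some (m.1, m.2.1, total)

-- ===== PRECONDITION & SPEC =====
def Spec_cheapest_day_route (route_prices : List (String × Int × Int)) (out : Option (String × Int × Int)) : Prop := out = cheapest_day_route_alt route_prices
instance (route_prices : List (String × Int × Int)) (out : Option (String × Int × Int)) : Decidable (Spec_cheapest_day_route route_prices out) := by unfold Spec_cheapest_day_route; infer_instance

-- ===== CLAIM (what is proved, stated in full; the proofs are below) =====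
def Claim_equal_cheapest_day_route : Prop := ∀ (route_prices : List (String × Int × Int)), Dom_cheapest_day_route route_prices → Spec_cheapest_day_route route_prices (cheapest_day_route route_prices)

-- ===== LEMMAS AND PROOFS =====

-- A's fold, split into its two independent components
theorem pv_loop_split (t : List (String × Int × Int)) (c : String × Int × Int) (n : Int) :
    t.foldl
      (fun (st : (String × Int × Int) × Int) day_price =>
        let st := (st.1, st.2 + day_price.2.2)
        if day_price.2.1 < st.1.2.1 then (day_price, st.2) else st)
      (c, n)
    = (t.foldl (fun m d => if d.2.1 < m.2.1 then d else m) c,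
       n + (t.map (fun x => x.2.2)).sum) := by
  induction t generalizing c n with
  | nil => simp
  | cons d t ih =>
    simp only [List.foldl_cons, List.map_cons, List.sum_cons]
    by_cases h : d.2.1 < c.2.1 <;> simp [h, ih] <;> ring_nf

-- one insertion step: the head changes exactly when the new key beats it strictly
theorem pv_insertBy_cons (bef : (String × Int × Int) → (String × Int × Int) → Bool)
    (x m : String × Int × Int) (t : List (String × Int × Int)) :
    PySem.List.insertBy bef x (m :: t)
      = if bef x m then x :: m :: t else m :: PySem.List.insertBy bef x t := by
  simp [PySem.List.insertBy]

-- invariant of the insertion-sort fold: the head of the accumulator evolves as A's strict-< running minimum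
theorem pv_foldl_insertBy_head (t : List (String × Int × Int)) (m : String × Int × Int)
    (r : List (String × Int × Int)) :
    ∃ r', t.foldl (fun acc x => PySem.List.insertBy (fun a b => decide (a.2.1 < b.2.1)) x acc) (m :: r)
      = (t.foldl (fun m d => if d.2.1 < m.2.1 then d else m) m) :: r' := by
  induction t generalizing m r with
  | nil => exact ⟨r, rfl⟩
  | cons d t ih =>
    simp only [List.foldl_cons, pv_insertBy_cons]
    by_cases h : d.2.1 < m.2.1
    · simpa [h] using ih d (m :: r)
    · simpa [h] using ih m (PySem.List.insertBy (fun a b => decide (a.2.1 < b.2.1)) d r)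

-- head of the stable sort by price = A's strict-< running minimum
theorem pv_sorted_head (c : String × Int × Int) (t : List (String × Int × Int)) :
    ∃ r', PySem.List.sorted (c :: t) (fun x => x.2.1)
      = (t.foldl (fun m d => if d.2.1 < m.2.1 then d else m) c) :: r' := by
  rw [PySem.List.sorted_eq_foldl_insertBy]
  simp only [List.foldl_cons]
  have h0 : PySem.List.insertBy (fun a b => decide ((fun x : String × Int × Int => x.2.1) a < (fun x : String × Int × Int => x.2.1) b)) c ([] : List (String × Int × Int)) = [c] := by
    simp [PySem.List.insertBy]
  rw [h0]
  exact pv_foldl_insertBy_head t c []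

-- ===== VERDICT (by name: the statement is the Claim_ definition above) =====
theorem cheapest_day_route_spec : Claim_equal_cheapest_day_route := by
  intro rp _
  unfold Spec_cheapest_day_route cheapest_day_route cheapest_day_route_alt
  cases rp with
  | nil => rfl
  | cons c t =>
    dsimp only
    rw [pv_loop_split]
    obtain ⟨r', hr⟩ := pv_sorted_head c t
    rw [hr, List.foldl_cons, if_neg (lt_irrefl _)]
    simp
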